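-- pv_equiv track=rewrite | github.com/akib1162100/hacker_rank | time_comp.py | gamingArray
-- ===== SOURCE A (Python) =====
-- def gamingArray(arr):
--     max_num = 0
--     min_val = 99999999999999
--     for i in range(0,len(arr)-2):
--         for j in range(i+1,len(arr)-1):
--             for k in range(j+1,len(arr)):
--                 if abs(arr[i]*arr[j]*arr[k]) > max_num:
--                     max_num = abs(arr[i]*arr[j]*arr[k])
--                 if abs(arr[i]*arr[j]*arr[k]) < min_val:
--                     min_val = abs(arr[i]*arr[j]*arr[k])
--
--     return str(min_val) + " " + str(max_num)
-- ===== SOURCE B (Python) =====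
-- def gamingArray(arr):
--     s = sorted(map(abs, arr))
--     return str(s[0] * s[1] * s[2]) + " " + str(s[-1] * s[-2] * s[-3])
-- ===== Notes on version B (the rewrite author's own statement) =====
-- stated objective: faster
-- what changed: Replaces the cubic scan of all index triples by sorting the absolute values once: the minimum absolute triple product is the product of the three smallest absolute values and the maximum is the product of the three largest; Pre_ excludes lists with fewer than 3 elements, where A returns its untouched initializers while B's indexing raises IndexError.
-- intended difference: On lists of 3 or more elements in which every triple has absolute product above 99999999999999, A reports its arbitrary initializer 99999999999999 as the minimum instead of the true minimum, which B returns; the true minimum is evidently the intended value. — e.g. on gamingArray([100000, 100000, 100000]): A returns "99999999999999 1000000000000000", B returns "1000000000000000 1000000000000000"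
-- outside the precondition, e.g. on gamingArray([1, 2]): A returns '99999999999999 0', B raises IndexError
import Mathlib
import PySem

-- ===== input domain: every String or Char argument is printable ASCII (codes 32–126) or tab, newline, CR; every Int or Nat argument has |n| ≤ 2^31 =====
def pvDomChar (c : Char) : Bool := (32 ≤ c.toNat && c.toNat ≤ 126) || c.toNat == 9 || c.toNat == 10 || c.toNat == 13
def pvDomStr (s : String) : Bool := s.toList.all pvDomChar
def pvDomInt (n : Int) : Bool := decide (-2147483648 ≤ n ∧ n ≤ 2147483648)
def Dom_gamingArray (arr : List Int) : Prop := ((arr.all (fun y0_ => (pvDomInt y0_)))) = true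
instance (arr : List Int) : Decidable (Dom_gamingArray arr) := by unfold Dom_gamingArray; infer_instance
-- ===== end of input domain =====

-- B sorts the absolute values once and multiplies the three smallest / three largest, instead of
-- scanning all index triples; where every triple's absolute product exceeds A's initializer
-- 99999999999999, A reports that initializer as the minimum and B reports the true minimum (D_ below).


-- ===== PORT A =====
-- the two 'if' updates of A's loop body on the state (max_num, min_val)
def pvStep (st : Int × Int) (p : Int) : Int × Int :=
  let st1 := if |p| > st.1 then (|p|, st.2) else st
  if |p| < st1.2 then (st1.1, |p|) else st1

def gamingArray (arr : List Int) : String :=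
  let st :=
    (PySem.List.pyRange 0 ((arr.length : Int) - 2) 1).foldl (fun st i =>
      (PySem.List.pyRange (i + 1) ((arr.length : Int) - 1) 1).foldl (fun st j =>
        (PySem.List.pyRange (j + 1) (arr.length : Int) 1).foldl (fun st k =>
          pvStep st (PySem.List.pyGetD arr i 0 * PySem.List.pyGetD arr j 0 * PySem.List.pyGetD arr k 0))
          st) st) ((0 : Int), (99999999999999 : Int))
  PySem.Int.toStr st.2 ++ " " ++ PySem.Int.toStr st.1

-- ===== PORT B =====
def gamingArray_alt (arr : List Int) : String :=
  let s := PySem.List.sorted (arr.map (fun x => |x|)) (fun x => x) false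
  PySem.Int.toStr (PySem.List.pyGetD s 0 0 * PySem.List.pyGetD s 1 0 * PySem.List.pyGetD s 2 0) ++ " " ++
  PySem.Int.toStr (PySem.List.pyGetD s (-1) 0 * PySem.List.pyGetD s (-2) 0 * PySem.List.pyGetD s (-3) 0)

-- ===== PRECONDITION & SPEC =====
-- Pre_ excludes lists with fewer than 3 elements: there A returns its untouched initializers
-- "99999999999999 0" while B's indexing raises IndexError.
def Pre_gamingArray (arr : List Int) : Prop := 3 ≤ arr.length
instance (arr : List Int) : Decidable (Pre_gamingArray arr) := by unfold Pre_gamingArray; infer_instance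
def pvWitness_gamingArray : List Int := [1, 2, 3]

-- On lists of 3 or more elements in which every triple of distinct positions has absolute product
-- above 99999999999999, A returns its arbitrary initializer 99999999999999 as the minimum instead of
-- the true minimum absolute triple product, which B returns; the true minimum is the intended value.
def D_gamingArray (arr : List Int) : Prop :=
  3 ≤ arr.length ∧ ∀ k < arr.length, ∀ j < k, ∀ i < j,
    (99999999999999 : Int) < |arr.getD i 0 * arr.getD j 0 * arr.getD k 0|
instance (arr : List Int) : Decidable (D_gamingArray arr) := by unfold D_gamingArray; infer_instance

def Spec_gamingArray (arr : List Int) (out : String) : Prop := ¬ D_gamingArray arr → out = gamingArray_alt arr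
instance (arr : List Int) (out : String) : Decidable (Spec_gamingArray arr out) := by unfold Spec_gamingArray; infer_instance

def pvDiffWitness_gamingArray : List Int := [100000, 100000, 100000]
def pvDiffWitnessOut_gamingArray : String × String :=
  ("99999999999999 1000000000000000", "1000000000000000 1000000000000000")

-- ===== CLAIM (what is proved, stated in full; the proofs are below) =====
def Claim_unchanged_gamingArray : Prop := ∀ (arr : List Int), Dom_gamingArray arr → Pre_gamingArray arr → Spec_gamingArray arr (gamingArray arr)
def Claim_changed_gamingArray : Prop := Dom_gamingArray (pvDiffWitness_gamingArray) ∧ Pre_gamingArray (pvDiffWitness_gamingArray) ∧ D_gamingArray (pvDiffWitness_gamingArray) ∧ gamingArray (pvDiffWitness_gamingArray) = pvDiffWitnessOut_gamingArray.1 ∧ gamingArray_alt (pvDiffWitness_gamingArray) = pvDiffWitnessOut_gamingArray.2 ∧ pvDiffWitnessOut_gamingArray.1 ≠ pvDiffWitnessOut_gamingArray.2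
def Claim_exact_gamingArray : Prop := ∀ (arr : List Int), Dom_gamingArray arr → Pre_gamingArray arr → D_gamingArray arr → gamingArray arr ≠ gamingArray_alt arr

-- ===== LEMMAS AND PROOFS =====

theorem pvStep_eq (st : Int × Int) (p : Int) : pvStep st p = (max st.1 |p|, min st.2 |p|) := by
  unfold pvStep
  rcases st with ⟨a, b⟩
  by_cases h1 : |p| > a <;> by_cases h2 : |p| < b <;>
    simp only [h1, h2, if_true, if_false] <;>
    refine Prod.ext ?_ ?_ <;> simp <;> omega

-- minimum / maximum over single elements, pair products and triple products of a list (none = no such tuple)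
def pvomin : Option Int → Option Int → Option Int
  | none, o => o
  | some a, none => some a
  | some a, some b => some (min a b)
def pvomax : Option Int → Option Int → Option Int
  | none, o => o
  | some a, none => some a
  | some a, some b => some (max a b)
def pvsc (c : Int) : Option Int → Option Int := Option.map (fun y => c * y)

def pvm1 : List Int → Option Int
  | [] => none
  | x :: xs => pvomin (some x) (pvm1 xs)
def pvm2 : List Int → Option Int
  | [] => none
  | x :: xs => pvomin (pvsc x (pvm1 xs)) (pvm2 xs)
def pvm3 : List Int → Option Int
  | [] => none
  | x :: xs => pvomin (pvsc x (pvm2 xs)) (pvm3 xs)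
def pvM1 : List Int → Option Int
  | [] => none
  | x :: xs => pvomax (some x) (pvM1 xs)
def pvM2 : List Int → Option Int
  | [] => none
  | x :: xs => pvomax (pvsc x (pvM1 xs)) (pvM2 xs)
def pvM3 : List Int → Option Int
  | [] => none
  | x :: xs => pvomax (pvsc x (pvM2 xs)) (pvM3 xs)

def pvapp (f : Int → Int → Int) (a : Int) : Option Int → Int
  | none => a
  | some v => f a v

theorem pvomin_comm (a b : Option Int) : pvomin a b = pvomin b a := by
  rcases a with _ | a <;> rcases b with _ | b <;> simp [pvomin, min_comm]
theorem pvomax_comm (a b : Option Int) : pvomax a b = pvomax b a := by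
  rcases a with _ | a <;> rcases b with _ | b <;> simp [pvomax, max_comm]
theorem pvomin_assoc (a b c : Option Int) : pvomin (pvomin a b) c = pvomin a (pvomin b c) := by
  rcases a with _ | a <;> rcases b with _ | b <;> rcases c with _ | c <;> simp [pvomin, min_assoc]
theorem pvomax_assoc (a b c : Option Int) : pvomax (pvomax a b) c = pvomax a (pvomax b c) := by
  rcases a with _ | a <;> rcases b with _ | b <;> rcases c with _ | c <;> simp [pvomax, max_assoc]
theorem pvomin_left_comm (a b c : Option Int) : pvomin a (pvomin b c) = pvomin b (pvomin a c) := by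
  rw [← pvomin_assoc, pvomin_comm a b, pvomin_assoc]
theorem pvomax_left_comm (a b c : Option Int) : pvomax a (pvomax b c) = pvomax b (pvomax a c) := by
  rw [← pvomax_assoc, pvomax_comm a b, pvomax_assoc]

theorem pvsc_omin (c : Int) (hc : 0 ≤ c) (o1 o2 : Option Int) :
    pvsc c (pvomin o1 o2) = pvomin (pvsc c o1) (pvsc c o2) := by
  rcases o1 with _ | a <;> rcases o2 with _ | b <;> simp [pvomin, pvsc, mul_min_of_nonneg _ _ hc]
theorem pvsc_omax (c : Int) (hc : 0 ≤ c) (o1 o2 : Option Int) :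
    pvsc c (pvomax o1 o2) = pvomax (pvsc c o1) (pvsc c o2) := by
  rcases o1 with _ | a <;> rcases o2 with _ | b <;> simp [pvomax, pvsc, mul_max_of_nonneg _ _ hc]
theorem pvsc_pvsc (c d : Int) (o : Option Int) : pvsc c (pvsc d o) = pvsc (c * d) o := by
  rcases o with _ | a <;> simp [pvsc, mul_assoc]

theorem pvapp_min_omin (a : Int) (o1 o2 : Option Int) :
    pvapp min a (pvomin o1 o2) = pvapp min (pvapp min a o1) o2 := by
  rcases o1 with _ | v <;> rcases o2 with _ | w <;> simp [pvomin, pvapp, min_assoc]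
theorem pvapp_max_omax (a : Int) (o1 o2 : Option Int) :
    pvapp max a (pvomax o1 o2) = pvapp max (pvapp max a o1) o2 := by
  rcases o1 with _ | v <;> rcases o2 with _ | w <;> simp [pvomax, pvapp, max_assoc]

-- structural versions of A's three nested loops
def pvInner (c : Int) (zs : List Int) (st : Int × Int) : Int × Int :=
  zs.foldl (fun st z => pvStep st (c * z)) st
def pvPair (x : Int) : List Int → (Int × Int) → Int × Int
  | [], st => st
  | y :: ys, st => pvPair x ys (pvInner (x * y) ys st)
def pvTriple : List Int → (Int × Int) → Int × Int
  | [], st => st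
  | x :: xs, st => pvTriple xs (pvPair x xs st)

theorem pvInner_eq (c : Int) (zs : List Int) (st : Int × Int) :
    pvInner c zs st = (pvapp max st.1 (pvsc |c| (pvM1 (zs.map (fun z => |z|)))),
                       pvapp min st.2 (pvsc |c| (pvm1 (zs.map (fun z => |z|))))) := by
  induction zs generalizing st with
  | nil => simp [pvInner, pvM1, pvm1, pvsc, pvapp]
  | cons z zs ih =>
      show pvInner c zs (pvStep st (c * z)) = _
      rw [ih, pvStep_eq]
      simp only [List.map_cons, pvM1, pvm1]
      rw [pvsc_omax _ (abs_nonneg c), pvsc_omin _ (abs_nonneg c),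
          pvapp_max_omax, pvapp_min_omin]
      simp [pvsc, pvapp, abs_mul]
theorem pvPair_eq (x : Int) (zs : List Int) (st : Int × Int) :
    pvPair x zs st = (pvapp max st.1 (pvsc |x| (pvM2 (zs.map (fun z => |z|)))),
                      pvapp min st.2 (pvsc |x| (pvm2 (zs.map (fun z => |z|))))) := by
  induction zs generalizing st with
  | nil => simp [pvPair, pvM2, pvm2, pvsc, pvapp]
  | cons y ys ih =>
      show pvPair x ys (pvInner (x * y) ys st) = _
      rw [ih, pvInner_eq]
      simp only [List.map_cons, pvM2, pvm2]
      rw [pvsc_omax _ (abs_nonneg x), pvsc_omin _ (abs_nonneg x),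
          pvapp_max_omax, pvapp_min_omin, pvsc_pvsc, pvsc_pvsc, ← abs_mul]
theorem pvTriple_eq (l : List Int) (st : Int × Int) :
    pvTriple l st = (pvapp max st.1 (pvM3 (l.map (fun z => |z|))),
                     pvapp min st.2 (pvm3 (l.map (fun z => |z|)))) := by
  induction l generalizing st with
  | nil => simp [pvTriple, pvM3, pvm3, pvapp]
  | cons x xs ih =>
      show pvTriple xs (pvPair x xs st) = _
      rw [ih, pvPair_eq]
      simp only [List.map_cons, pvM3, pvm3]
      rw [pvapp_max_omax, pvapp_min_omin]

-- index-loop → structural-loop conversions (all ranges ending at the full length)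
theorem pvInner_conv (l : List Int) (c : Int) (a : Nat) (st : Int × Int) :
    (PySem.List.pyRange a (l.length : Int) 1).foldl
      (fun st k => pvStep st (c * PySem.List.pyGetD l k 0)) st = pvInner c (l.drop a) st := by
  have := PySem.List.foldl_pyRange_pyGetD' l 0 (fun st z => pvStep st (c * z)) st
    (a := (a : Int)) (by positivity)
  simpa using this

theorem pvMid_conv (l : List Int) (x : Int) :
    ∀ (d a : Nat) (st : Int × Int), l.length = a + d →
    (PySem.List.pyRange a (l.length : Int) 1).foldl
      (fun st j => (PySem.List.pyRange (j + 1) (l.length : Int) 1).foldl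
        (fun st k => pvStep st (x * PySem.List.pyGetD l j 0 * PySem.List.pyGetD l k 0)) st) st
    = pvPair x (l.drop a) st := by
  intro d
  induction d with
  | zero =>
      intro a st h
      rw [PySem.List.pyRange_one_eq_nil (by omega), List.foldl_nil,
          List.drop_of_length_le (by omega)]
      rfl
  | succ d ih =>
      intro a st h
      have ha : a < l.length := by omega
      rw [PySem.List.pyRange_one_cons (by exact_mod_cast ha), List.foldl_cons]
      have hcast : ((a : Int) + 1) = ((a + 1 : Nat) : Int) := by push_cast; ring
      rw [hcast, pvInner_conv, ih (a + 1) _ (by omega),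
          PySem.List.pyGetD_eq_getElem l 0 (by positivity) (by exact_mod_cast ha),
          List.drop_eq_getElem_cons ha]
      simp [pvPair]

theorem pvOuter_conv (l : List Int) :
    ∀ (d a : Nat) (st : Int × Int), l.length = a + d →
    (PySem.List.pyRange a (l.length : Int) 1).foldl
      (fun st i => (PySem.List.pyRange (i + 1) (l.length : Int) 1).foldl
        (fun st j => (PySem.List.pyRange (j + 1) (l.length : Int) 1).foldl
          (fun st k => pvStep st (PySem.List.pyGetD l i 0 * PySem.List.pyGetD l j 0 * PySem.List.pyGetD l k 0)) st) st) st
    = pvTriple (l.drop a) st := by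
  intro d
  induction d with
  | zero =>
      intro a st h
      rw [PySem.List.pyRange_one_eq_nil (by omega), List.foldl_nil,
          List.drop_of_length_le (by omega)]
      rfl
  | succ d ih =>
      intro a st h
      have ha : a < l.length := by omega
      rw [PySem.List.pyRange_one_cons (by exact_mod_cast ha), List.foldl_cons]
      have hcast : ((a : Int) + 1) = ((a + 1 : Nat) : Int) := by push_cast; ring
      rw [hcast, pvMid_conv l _ d (a + 1) _ (by omega), ih (a + 1) _ (by omega),
          PySem.List.pyGetD_eq_getElem l 0 (by positivity) (by exact_mod_cast ha),
          List.drop_eq_getElem_cons ha]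
      simp [pvTriple]

-- the two truncated ranges of A (to n-2 and n-1) may be extended to n: the extra iterations are no-ops
theorem pvExtend (arr : List Int) (h : 3 ≤ arr.length) (st0 : Int × Int) :
    (PySem.List.pyRange 0 ((arr.length : Int) - 2) 1).foldl (fun st i =>
      (PySem.List.pyRange (i + 1) ((arr.length : Int) - 1) 1).foldl (fun st j =>
        (PySem.List.pyRange (j + 1) (arr.length : Int) 1).foldl (fun st k =>
          pvStep st (PySem.List.pyGetD arr i 0 * PySem.List.pyGetD arr j 0 * PySem.List.pyGetD arr k 0))
          st) st) st0
    = (PySem.List.pyRange 0 (arr.length : Int) 1).foldl (fun st i =>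
      (PySem.List.pyRange (i + 1) (arr.length : Int) 1).foldl (fun st j =>
        (PySem.List.pyRange (j + 1) (arr.length : Int) 1).foldl (fun st k =>
          pvStep st (PySem.List.pyGetD arr i 0 * PySem.List.pyGetD arr j 0 * PySem.List.pyGetD arr k 0))
          st) st) st0 := by
  set n : Int := (arr.length : Int) with hn
  have h3 : 3 ≤ n := by rw [hn]; exact_mod_cast h
  have hone : PySem.List.pyRange (n - 1) n 1 = [n - 1] := by
    have := PySem.List.pyRange_one_singleton (n - 1)
    rwa [show n - 1 + 1 = n by ring] at this
  have hcongr : ∀ (st : Int × Int) (i : Int), i ∈ PySem.List.pyRange 0 (n - 2) 1 →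
      (PySem.List.pyRange (i + 1) (n - 1) 1).foldl (fun st j =>
        (PySem.List.pyRange (j + 1) n 1).foldl (fun st k =>
          pvStep st (PySem.List.pyGetD arr i 0 * PySem.List.pyGetD arr j 0 * PySem.List.pyGetD arr k 0)) st) st
      = (PySem.List.pyRange (i + 1) n 1).foldl (fun st j =>
        (PySem.List.pyRange (j + 1) n 1).foldl (fun st k =>
          pvStep st (PySem.List.pyGetD arr i 0 * PySem.List.pyGetD arr j 0 * PySem.List.pyGetD arr k 0)) st) st := by
    intro st i hi
    rw [PySem.List.mem_pyRange_one] at hi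
    rw [PySem.List.pyRange_one_append (i + 1) (n - 1) n (by omega) (by omega), hone,
        List.foldl_append, List.foldl_cons, List.foldl_nil,
        show n - 1 + 1 = n by ring,
        PySem.List.pyRange_one_eq_nil (le_refl n), List.foldl_nil]
  rw [PySem.List.foldl_congr_mem _ _ _ _ hcongr]
  have h2l : PySem.List.pyRange (n - 2) n 1 = [n - 2, n - 1] := by
    rw [PySem.List.pyRange_one_cons (show n - 2 < n by omega),
        show n - 2 + 1 = n - 1 by ring,
        PySem.List.pyRange_one_cons (show n - 1 < n by omega),
        show n - 1 + 1 = n by ring,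
        PySem.List.pyRange_one_eq_nil (le_refl n)]
  rw [PySem.List.pyRange_one_append 0 (n - 2) n (by omega) (by omega), h2l,
      List.foldl_append, List.foldl_cons, List.foldl_cons, List.foldl_nil,
      show n - 2 + 1 = n - 1 by ring, hone,
      List.foldl_cons, List.foldl_nil,
      show n - 1 + 1 = n by ring,
      PySem.List.pyRange_one_eq_nil (le_refl n), List.foldl_nil, List.foldl_nil]

-- A in closed form
theorem gamingArray_eq (arr : List Int) (h : 3 ≤ arr.length) :
    gamingArray arr =
      PySem.Int.toStr (pvapp min 99999999999999 (pvm3 (arr.map (fun z => |z|)))) ++ " " ++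
      PySem.Int.toStr (pvapp max 0 (pvM3 (arr.map (fun z => |z|)))) := by
  have hconv := pvOuter_conv arr arr.length 0 ((0 : Int), (99999999999999 : Int)) (by omega)
  push_cast at hconv
  rw [List.drop_zero] at hconv
  unfold gamingArray
  rw [pvExtend arr h, hconv, pvTriple_eq]

-- the three minima/maxima only depend on the multiset of a nonneg list
theorem pv_min_perm {l l' : List Int} (h : l.Perm l') (hn : ∀ x ∈ l, 0 ≤ x) :
    pvm1 l = pvm1 l' ∧ pvm2 l = pvm2 l' ∧ pvm3 l = pvm3 l' := by
  induction h with
  | nil => exact ⟨rfl, rfl, rfl⟩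
  | cons x h ih =>
      obtain ⟨h1, h2, h3⟩ := ih (fun y hy => hn y (List.mem_cons_of_mem x hy))
      exact ⟨by simp [pvm1, h1], by simp [pvm2, h1, h2], by simp [pvm3, h2, h3]⟩
  | swap x y l =>
      have hx : 0 ≤ x := hn x (by simp)
      have hy : 0 ≤ y := hn y (by simp)
      refine ⟨?_, ?_, ?_⟩
      · simp [pvm1, pvomin_left_comm]
      · simp only [pvm2, pvm1]
        rw [pvsc_omin _ hy, pvsc_omin _ hx]
        simp only [pvsc, Option.map_some, mul_comm y x]
        simp [pvomin_assoc, pvomin_comm, pvomin_left_comm]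
      · simp only [pvm3, pvm2]
        rw [pvsc_omin _ hy, pvsc_omin _ hx, pvsc_pvsc, pvsc_pvsc, mul_comm y x]
        simp [pvomin_assoc, pvomin_comm, pvomin_left_comm]
  | trans h1 h2 ih1 ih2 =>
      have hn2 := fun y hy => hn y (h1.mem_iff.mpr hy)
      obtain ⟨a1, a2, a3⟩ := ih1 hn
      obtain ⟨b1, b2, b3⟩ := ih2 hn2
      exact ⟨a1.trans b1, a2.trans b2, a3.trans b3⟩

theorem pv_max_perm {l l' : List Int} (h : l.Perm l') (hn : ∀ x ∈ l, 0 ≤ x) :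
    pvM1 l = pvM1 l' ∧ pvM2 l = pvM2 l' ∧ pvM3 l = pvM3 l' := by
  induction h with
  | nil => exact ⟨rfl, rfl, rfl⟩
  | cons x h ih =>
      obtain ⟨h1, h2, h3⟩ := ih (fun y hy => hn y (List.mem_cons_of_mem x hy))
      exact ⟨by simp [pvM1, h1], by simp [pvM2, h1, h2], by simp [pvM3, h2, h3]⟩
  | swap x y l =>
      have hx : 0 ≤ x := hn x (by simp)
      have hy : 0 ≤ y := hn y (by simp)
      refine ⟨?_, ?_, ?_⟩
      · simp [pvM1, pvomax_left_comm]
      · simp only [pvM2, pvM1]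
        rw [pvsc_omax _ hy, pvsc_omax _ hx]
        simp only [pvsc, Option.map_some, mul_comm y x]
        simp [pvomax_assoc, pvomax_comm, pvomax_left_comm]
      · simp only [pvM3, pvM2]
        rw [pvsc_omax _ hy, pvsc_omax _ hx, pvsc_pvsc, pvsc_pvsc, mul_comm y x]
        simp [pvomax_assoc, pvomax_comm, pvomax_left_comm]
  | trans h1 h2 ih1 ih2 =>
      have hn2 := fun y hy => hn y (h1.mem_iff.mpr hy)
      obtain ⟨a1, a2, a3⟩ := ih1 hn
      obtain ⟨b1, b2, b3⟩ := ih2 hn2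
      exact ⟨a1.trans b1, a2.trans b2, a3.trans b3⟩

-- on an ascending nonneg list the minima are the products of the first elements
theorem pvm1_sorted : ∀ (t : List Int) (x : Int), (x :: t).Pairwise (· ≤ ·) → pvm1 (x :: t) = some x := by
  intro t
  induction t with
  | nil => intro x _; simp [pvm1, pvomin]
  | cons y t ih =>
      intro x hp
      have hxy : x ≤ y := (List.pairwise_cons.mp hp).1 y (by simp)
      rw [pvm1, ih y hp.tail]
      simp [pvomin, min_eq_left hxy]

theorem pvm2_sorted : ∀ (t : List Int) (x y : Int), (x :: y :: t).Pairwise (· ≤ ·) →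
    (∀ z ∈ x :: y :: t, 0 ≤ z) → pvm2 (x :: y :: t) = some (x * y) := by
  intro t
  induction t with
  | nil =>
      intro x y hp _
      simp [pvm2, pvm1, pvsc, pvomin]
  | cons z t ih =>
      intro x y hp hn
      have h1 : pvm1 (y :: z :: t) = some y := pvm1_sorted _ y hp.tail
      have h2 : pvm2 (y :: z :: t) = some (y * z) :=
        ih y z hp.tail (fun w hw => hn w (List.mem_cons_of_mem x hw))
      have hxz : x ≤ z := (List.pairwise_cons.mp hp).1 z (by simp)
      have hy : 0 ≤ y := hn y (by simp)
      have : x * y ≤ y * z := by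
        calc x * y ≤ z * y := mul_le_mul_of_nonneg_right hxz hy
        _ = y * z := mul_comm z y
      rw [pvm2, h1, h2]
      simp [pvsc, pvomin, min_eq_left this]

theorem pvm3_sorted : ∀ (t : List Int) (x y z : Int), (x :: y :: z :: t).Pairwise (· ≤ ·) →
    (∀ w ∈ x :: y :: z :: t, 0 ≤ w) → pvm3 (x :: y :: z :: t) = some (x * (y * z)) := by
  intro t
  induction t with
  | nil =>
      intro x y z hp hn
      have h2 : pvm2 [y, z] = some (y * z) :=
        pvm2_sorted [] y z hp.tail (fun w hw => hn w (List.mem_cons_of_mem x hw))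
      rw [pvm3, h2]
      simp [pvm3, pvm2, pvm1, pvsc, pvomin]
  | cons w t ih =>
      intro x y z hp hn
      have h2 : pvm2 (y :: z :: w :: t) = some (y * z) :=
        pvm2_sorted _ y z hp.tail (fun u hu => hn u (List.mem_cons_of_mem x hu))
      have h3 : pvm3 (y :: z :: w :: t) = some (y * (z * w)) :=
        ih y z w hp.tail (fun u hu => hn u (List.mem_cons_of_mem x hu))
      have hxw : x ≤ w := (List.pairwise_cons.mp hp).1 w (by simp)
      have hyz : 0 ≤ y * z := mul_nonneg (hn y (by simp)) (hn z (by simp))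
      have : x * (y * z) ≤ y * (z * w) := by
        calc x * (y * z) = (y * z) * x := by ring
        _ ≤ (y * z) * w := mul_le_mul_of_nonneg_left hxw hyz
        _ = y * (z * w) := by ring
      rw [pvm3, h2, h3]
      simp [pvsc, pvomin, min_eq_left this]

-- on a descending nonneg list the maxima are the products of the first elements
theorem pvM1_sorted : ∀ (t : List Int) (x : Int), (x :: t).Pairwise (fun a b => b ≤ a) → pvM1 (x :: t) = some x := by
  intro t
  induction t with
  | nil => intro x _; simp [pvM1, pvomax]
  | cons y t ih =>
      intro x hp
      have hxy : y ≤ x := (List.pairwise_cons.mp hp).1 y (by simp)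
      rw [pvM1, ih y hp.tail]
      simp [pvomax, max_eq_left hxy]

theorem pvM2_sorted : ∀ (t : List Int) (x y : Int), (x :: y :: t).Pairwise (fun a b => b ≤ a) →
    (∀ z ∈ x :: y :: t, 0 ≤ z) → pvM2 (x :: y :: t) = some (x * y) := by
  intro t
  induction t with
  | nil =>
      intro x y hp _
      simp [pvM2, pvM1, pvsc, pvomax]
  | cons z t ih =>
      intro x y hp hn
      have h1 : pvM1 (y :: z :: t) = some y := pvM1_sorted _ y hp.tail
      have h2 : pvM2 (y :: z :: t) = some (y * z) :=
        ih y z hp.tail (fun w hw => hn w (List.mem_cons_of_mem x hw))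
      have hzx : z ≤ x := (List.pairwise_cons.mp hp).1 z (by simp)
      have hy : 0 ≤ y := hn y (by simp)
      have : y * z ≤ x * y := by
        calc y * z = z * y := mul_comm y z
        _ ≤ x * y := mul_le_mul_of_nonneg_right hzx hy
      rw [pvM2, h1, h2]
      simp [pvsc, pvomax, max_eq_left this]

theorem pvM3_sorted : ∀ (t : List Int) (x y z : Int), (x :: y :: z :: t).Pairwise (fun a b => b ≤ a) →
    (∀ w ∈ x :: y :: z :: t, 0 ≤ w) → pvM3 (x :: y :: z :: t) = some (x * (y * z)) := by
  intro t
  induction t with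
  | nil =>
      intro x y z hp hn
      have h2 : pvM2 [y, z] = some (y * z) :=
        pvM2_sorted [] y z hp.tail (fun w hw => hn w (List.mem_cons_of_mem x hw))
      rw [pvM3, h2]
      simp [pvM3, pvM2, pvM1, pvsc, pvomax]
  | cons w t ih =>
      intro x y z hp hn
      have h2 : pvM2 (y :: z :: w :: t) = some (y * z) :=
        pvM2_sorted _ y z hp.tail (fun u hu => hn u (List.mem_cons_of_mem x hu))
      have h3 : pvM3 (y :: z :: w :: t) = some (y * (z * w)) :=
        ih y z w hp.tail (fun u hu => hn u (List.mem_cons_of_mem x hu))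
      have hwx : w ≤ x := (List.pairwise_cons.mp hp).1 w (by simp)
      have hyz : 0 ≤ y * z := mul_nonneg (hn y (by simp)) (hn z (by simp))
      have : y * (z * w) ≤ x * (y * z) := by
        calc y * (z * w) = (y * z) * w := by ring
        _ ≤ (y * z) * x := mul_le_mul_of_nonneg_left hwx hyz
        _ = x * (y * z) := by ring
      rw [pvM3, h2, h3]
      simp [pvsc, pvomax, max_eq_left this]

theorem pv_exists_cons3 (l : List Int) (h : 3 ≤ l.length) :
    ∃ a b c t, l = a :: b :: c :: t := by
  match l with
  | a :: b :: c :: t => exact ⟨a, b, c, t, rfl⟩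
  | [] | [_] | [_, _] => simp at h

-- the common shape of both ports on a list of length ≥ 3: the same maximum part M, A's minimum part
-- capped by its initializer, B's minimum part the true minimum m of the absolute triple products
theorem pv_forms (arr : List Int) (h : 3 ≤ arr.length) :
    ∃ m M, pvm3 (arr.map (fun z => |z|)) = some m ∧
      gamingArray arr = PySem.Int.toStr (min 99999999999999 m) ++ " " ++ PySem.Int.toStr M ∧
      gamingArray_alt arr = PySem.Int.toStr m ++ " " ++ PySem.Int.toStr M := by
  unfold gamingArray_alt
  set b : List Int := arr.map (fun x => |x|) with hb
  have hbn : ∀ x ∈ b, 0 ≤ x := by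
    intro x hx
    obtain ⟨y, _, rfl⟩ := List.mem_map.mp hx
    exact abs_nonneg y
  set s : List Int := PySem.List.sorted b (fun x => x) false with hs
  have hsp : s.Perm b := PySem.List.sorted_perm b (fun x => x) false
  have hsn : ∀ x ∈ s, 0 ≤ x := fun x hx => hbn x (hsp.mem_iff.mp hx)
  have hslen : s.length = arr.length := by
    rw [hs, PySem.List.length_sorted, hb, List.length_map]
  have hsort : s.Pairwise (· ≤ ·) := by
    have := PySem.List.sorted_pairwise b (fun x => x)
    simpa [hs] using this
  have hrn : ∀ x ∈ s.reverse, 0 ≤ x := fun x hx => hsn x (List.mem_reverse.mp hx)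
  have hrsort : s.reverse.Pairwise (fun a b => b ≤ a) := List.pairwise_reverse.mpr hsort
  obtain ⟨s0, s1, s2, t, hcons⟩ := pv_exists_cons3 s (by omega)
  have hm3 : pvm3 b = some (s0 * (s1 * s2)) := by
    rw [← (pv_min_perm hsp hsn).2.2, hcons]
    exact pvm3_sorted t s0 s1 s2 (hcons ▸ hsort) (hcons ▸ hsn)
  obtain ⟨r0, r1, r2, u, hrcons⟩ := pv_exists_cons3 s.reverse (by simp; omega)
  have hM3 : pvM3 b = some (r0 * (r1 * r2)) := by
    rw [← (pv_max_perm ((s.reverse_perm).trans hsp) hrn).2.2, hrcons]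
    exact pvM3_sorted u r0 r1 r2 (hrcons ▸ hrsort) (hrcons ▸ hrn)
  have hr0n : 0 ≤ r0 := hrn r0 (by rw [hrcons]; simp)
  have hr1n : 0 ≤ r1 := hrn r1 (by rw [hrcons]; simp)
  have hr2n : 0 ≤ r2 := hrn r2 (by rw [hrcons]; simp)
  have hlen3 : 3 ≤ s.length := by omega
  have hgm1 : PySem.List.pyGetD s (-1) 0 = r0 := by
    rw [PySem.List.pyGetD_neg_ofNat s 1 0 (by norm_num) (by omega)]
    have h2 : s[s.length - 1]'(by omega) = s.reverse[0]'(by simp; omega) := by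
      rw [List.getElem_reverse]
      simp only [Nat.sub_zero]
    rw [h2, List.getElem_of_eq hrcons]
    simp
  have hgm2 : PySem.List.pyGetD s (-2) 0 = r1 := by
    rw [PySem.List.pyGetD_neg_ofNat s 2 0 (by norm_num) (by omega)]
    have h2 : s[s.length - 2]'(by omega) = s.reverse[1]'(by simp; omega) := by
      rw [List.getElem_reverse]
      simp only [show s.length - 1 - 1 = s.length - 2 from by omega]
    rw [h2, List.getElem_of_eq hrcons]
    simp
  have hgm3 : PySem.List.pyGetD s (-3) 0 = r2 := by
    rw [PySem.List.pyGetD_neg_ofNat s 3 0 (by norm_num) (by omega)]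
    have h2 : s[s.length - 3]'(by omega) = s.reverse[2]'(by simp; omega) := by
      rw [List.getElem_reverse]
      simp only [show s.length - 1 - 2 = s.length - 3 from by omega]
    rw [h2, List.getElem_of_eq hrcons]
    simp
  have hg0 : PySem.List.pyGetD s 0 0 = s0 := by rw [hcons]; exact PySem.List.pyGetD_zero_cons _ _ _
  have hg1 : PySem.List.pyGetD s 1 0 = s1 := by
    rw [PySem.List.pyGetD_eq_getElem s 0 (by norm_num) (by exact_mod_cast by omega : (1:Int) < (s.length:Int))]
    rw [List.getElem_of_eq hcons]
    simp
  have hg2 : PySem.List.pyGetD s 2 0 = s2 := by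
    rw [PySem.List.pyGetD_eq_getElem s 0 (by norm_num) (by exact_mod_cast by omega : (2:Int) < (s.length:Int))]
    rw [List.getElem_of_eq hcons]
    simp
  refine ⟨s0 * (s1 * s2), r0 * r1 * r2, hm3, ?_, ?_⟩
  · rw [gamingArray_eq arr h, hm3, hM3]
    have hmax : pvapp max 0 (some (r0 * (r1 * r2))) = r0 * r1 * r2 := by
      have : (0:Int) ≤ r0 * (r1 * r2) := mul_nonneg hr0n (mul_nonneg hr1n hr2n)
      simp [pvapp, max_eq_right this, mul_assoc]
    have hmin : pvapp min 99999999999999 (some (s0 * (s1 * s2))) = min 99999999999999 (s0 * (s1 * s2)) := by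
      simp [pvapp]
    rw [hmax, hmin]
  · simp only [hgm1, hgm2, hgm3, hg0, hg1, hg2, mul_assoc]

-- the minimum pvm3 is a lower bound on every ordered triple product of a nonneg list
theorem pvm1_le (l : List Int) (x : Int) (hx : x ∈ l) : ∃ m, pvm1 l = some m ∧ m ≤ x := by
  induction l with
  | nil => simp at hx
  | cons a t ih =>
      rcases List.mem_cons.mp hx with rfl | hx'
      · cases h1 : pvm1 t with
        | none => exact ⟨x, by simp [pvm1, h1, pvomin], le_refl x⟩
        | some m' => exact ⟨min x m', by simp [pvm1, h1, pvomin], min_le_left _ _⟩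
      · obtain ⟨m', hm', hle⟩ := ih hx'
        exact ⟨min a m', by simp [pvm1, hm', pvomin], le_trans (min_le_right _ _) hle⟩

theorem pvm2_le (l : List Int) (hn : ∀ w ∈ l, 0 ≤ w) (x y : Int) (h : [x, y].Sublist l) :
    ∃ m, pvm2 l = some m ∧ m ≤ x * y := by
  induction l with
  | nil => simp at h
  | cons a t ih =>
      cases h with
      | cons _ h' =>
          obtain ⟨m2, hm2, hle⟩ := ih (fun w hw => hn w (List.mem_cons_of_mem a hw)) h'
          cases h1 : pvm1 t with
          | none => exact ⟨m2, by simp [pvm2, h1, hm2, pvsc, pvomin], hle⟩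
          | some m1 =>
              exact ⟨min (a * m1) m2, by simp [pvm2, h1, hm2, pvsc, pvomin],
                le_trans (min_le_right _ _) hle⟩
      | cons₂ _ h' =>
          have hy : y ∈ t := h'.subset (by simp)
          obtain ⟨m1, hm1, hle1⟩ := pvm1_le t y hy
          have hx0 : 0 ≤ x := hn x (by simp)
          have hax : x * m1 ≤ x * y := mul_le_mul_of_nonneg_left hle1 hx0
          cases h2 : pvm2 t with
          | none => exact ⟨x * m1, by simp [pvm2, hm1, h2, pvsc, pvomin], hax⟩
          | some m2 =>
              exact ⟨min (x * m1) m2, by simp [pvm2, hm1, h2, pvsc, pvomin],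
                le_trans (min_le_left _ _) hax⟩

theorem pvm3_le (l : List Int) (hn : ∀ w ∈ l, 0 ≤ w) (x y z : Int) (h : [x, y, z].Sublist l) :
    ∃ m, pvm3 l = some m ∧ m ≤ x * (y * z) := by
  induction l with
  | nil => simp at h
  | cons a t ih =>
      cases h with
      | cons _ h' =>
          obtain ⟨m3, hm3, hle⟩ := ih (fun w hw => hn w (List.mem_cons_of_mem a hw)) h'
          cases h2 : pvm2 t with
          | none => exact ⟨m3, by simp [pvm3, h2, hm3, pvsc, pvomin], hle⟩
          | some m2 =>
              exact ⟨min (a * m2) m3, by simp [pvm3, h2, hm3, pvsc, pvomin],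
                le_trans (min_le_right _ _) hle⟩
      | cons₂ _ h' =>
          obtain ⟨m2, hm2, hle2⟩ := pvm2_le t (fun w hw => hn w (List.mem_cons_of_mem x hw)) y z h'
          have hx0 : 0 ≤ x := hn x (by simp)
          have hax : x * m2 ≤ x * (y * z) := mul_le_mul_of_nonneg_left hle2 hx0
          cases h3 : pvm3 t with
          | none => exact ⟨x * m2, by simp [pvm3, hm2, h3, pvsc, pvomin], hax⟩
          | some m3 =>
              exact ⟨min (x * m2) m3, by simp [pvm3, hm2, h3, pvsc, pvomin],
                le_trans (min_le_left _ _) hax⟩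

-- the minimum pvm3 is attained by some ordered triple of the list
theorem pvm1_att (l : List Int) (m : Int) (h : pvm1 l = some m) : m ∈ l := by
  induction l generalizing m with
  | nil => simp [pvm1] at h
  | cons a t ih =>
      cases h1 : pvm1 t with
      | none =>
          rw [pvm1, h1] at h
          simp [pvomin] at h
          simp [h]
      | some m' =>
          rw [pvm1, h1] at h
          simp [pvomin] at h
          rcases min_choice a m' with hc | hc
          · have : m = a := by omega
            simp [this]
          · have : m = m' := by omega
            exact this ▸ List.mem_cons_of_mem a (ih m' h1)

theorem pvm2_att (l : List Int) (m : Int) (h : pvm2 l = some m) :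
    ∃ x y, [x, y].Sublist l ∧ m = x * y := by
  induction l generalizing m with
  | nil => simp [pvm2] at h
  | cons a t ih =>
      cases h1 : pvm1 t with
      | none =>
          cases h2 : pvm2 t with
          | none => rw [pvm2, h1, h2] at h; simp [pvsc, pvomin] at h
          | some m2 =>
              rw [pvm2, h1, h2] at h; simp [pvsc, pvomin] at h
              obtain ⟨x, y, hs, rfl⟩ := ih m2 h2
              exact ⟨x, y, hs.cons a, h.symm⟩
      | some m1 =>
          cases h2 : pvm2 t with
          | none =>
              rw [pvm2, h1, h2] at h; simp [pvsc, pvomin] at h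
              exact ⟨a, m1, (List.singleton_sublist.mpr (pvm1_att t m1 h1)).cons₂ a, h.symm⟩
          | some m2 =>
              rw [pvm2, h1, h2] at h; simp [pvsc, pvomin] at h
              rcases min_choice (a * m1) m2 with hc | hc
              · exact ⟨a, m1, (List.singleton_sublist.mpr (pvm1_att t m1 h1)).cons₂ a, by omega⟩
              · obtain ⟨x, y, hs, rfl⟩ := ih m2 h2
                exact ⟨x, y, hs.cons a, by omega⟩

theorem pvm3_att (l : List Int) (m : Int) (h : pvm3 l = some m) :
    ∃ x y z, [x, y, z].Sublist l ∧ m = x * (y * z) := by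
  induction l generalizing m with
  | nil => simp [pvm3] at h
  | cons a t ih =>
      cases h2 : pvm2 t with
      | none =>
          cases h3 : pvm3 t with
          | none => rw [pvm3, h2, h3] at h; simp [pvsc, pvomin] at h
          | some m3 =>
              rw [pvm3, h2, h3] at h; simp [pvsc, pvomin] at h
              obtain ⟨x, y, z, hs, rfl⟩ := ih m3 h3
              exact ⟨x, y, z, hs.cons a, h.symm⟩
      | some m2 =>
          cases h3 : pvm3 t with
          | none =>
              rw [pvm3, h2, h3] at h; simp [pvsc, pvomin] at h
              obtain ⟨x, y, hs, rfl⟩ := pvm2_att t m2 h2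
              exact ⟨a, x, y, hs.cons₂ a, h.symm⟩
          | some m3 =>
              rw [pvm3, h2, h3] at h; simp [pvsc, pvomin] at h
              rcases min_choice (a * m2) m3 with hc | hc
              · obtain ⟨x, y, hs, rfl⟩ := pvm2_att t m2 h2
                exact ⟨a, x, y, hs.cons₂ a, by omega⟩
              · obtain ⟨x, y, z, hs, rfl⟩ := ih m3 h3
                exact ⟨x, y, z, hs.cons a, by omega⟩

-- three increasing indices give a 3-element sublist, and conversely
theorem pv_idx2_sub (l : List Int) (i j : Nat) (hij : i < j) (hj : j < l.length) :
    [l[i]'(by omega), l[j]'hj].Sublist l := by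
  induction l generalizing i j with
  | nil => simp at hj
  | cons a t ih =>
      cases i with
      | zero =>
          cases j with
          | zero => omega
          | succ j' =>
              have hjt : j' < t.length := by simp at hj; omega
              have : t[j'] ∈ t := List.getElem_mem hjt
              exact (List.singleton_sublist.mpr this).cons₂ a
      | succ i' =>
          cases j with
          | zero => omega
          | succ j' =>
              have hjt : j' < t.length := by simp at hj; omega
              exact (ih i' j' (by omega) hjt).cons a

theorem pv_idx3_sub (l : List Int) (i j k : Nat) (hij : i < j) (hjk : j < k) (hk : k < l.length) :
    [l[i]'(by omega), l[j]'(by omega), l[k]'hk].Sublist l := by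
  induction l generalizing i j k with
  | nil => simp at hk
  | cons a t ih =>
      cases i with
      | zero =>
          cases j with
          | zero => omega
          | succ j' =>
              cases k with
              | zero => omega
              | succ k' =>
                  have hkt : k' < t.length := by simp at hk; omega
                  exact (pv_idx2_sub t j' k' (by omega) hkt).cons₂ a
      | succ i' =>
          cases j with
          | zero => omega
          | succ j' =>
              cases k with
              | zero => omega
              | succ k' =>
                  have hkt : k' < t.length := by simp at hk; omega
                  exact (ih i' j' k' (by omega) (by omega) hkt).cons a

theorem pv_sub2_idx (l : List Int) (x y : Int) (h : [x, y].Sublist l) :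
    ∃ i j, ∃ hij : i < j, ∃ hj : j < l.length, l[i]'(by omega) = x ∧ l[j]'hj = y := by
  induction l with
  | nil => simp at h
  | cons a t ih =>
      cases h with
      | cons _ h' =>
          obtain ⟨i, j, hij, hj, hxe, hye⟩ := ih h'
          exact ⟨i + 1, j + 1, by omega, by simp; omega, by simpa using hxe, by simpa using hye⟩
      | cons₂ _ h' =>
          have hy : y ∈ t := h'.subset (by simp)
          obtain ⟨j, hj, hyj⟩ := List.mem_iff_getElem.mp hy
          exact ⟨0, j + 1, by omega, by simp; omega, by simp, by simpa using hyj⟩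

theorem pv_sub3_idx (l : List Int) (x y z : Int) (h : [x, y, z].Sublist l) :
    ∃ i j k, ∃ hij : i < j, ∃ hjk : j < k, ∃ hk : k < l.length,
      l[i]'(by omega) = x ∧ l[j]'(by omega) = y ∧ l[k]'hk = z := by
  induction l with
  | nil => simp at h
  | cons a t ih =>
      cases h with
      | cons _ h' =>
          obtain ⟨i, j, k, hij, hjk, hk, hxe, hye, hze⟩ := ih h'
          exact ⟨i + 1, j + 1, k + 1, by omega, by omega, by simp; omega,
            by simpa using hxe, by simpa using hye, by simpa using hze⟩
      | cons₂ _ h' =>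
          obtain ⟨j, k, hjk, hk, hye, hze⟩ := pv_sub2_idx t y z h'
          exact ⟨0, j + 1, k + 1, by omega, by omega, by simp; omega,
            by simp, by simpa using hye, by simpa using hze⟩

-- inside D_ the true minimum exceeds A's initializer; outside D_ (with length ≥ 3) it does not
theorem pv_D_min_gt (arr : List Int) (hD : D_gamingArray arr) (m : Int)
    (hm : pvm3 (arr.map (fun z => |z|)) = some m) : 99999999999999 < m := by
  obtain ⟨x, y, z, hs, rfl⟩ := pvm3_att _ m hm
  obtain ⟨i, j, k, hij, hjk, hk, hx, hy, hz⟩ := pv_sub3_idx _ x y z hs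
  have hk' : k < arr.length := by simpa using hk
  have hxe : x = |arr[i]'(by omega)| := by
    rw [← hx]; simp
  have hye : y = |arr[j]'(by omega)| := by
    rw [← hy]; simp
  have hze : z = |arr[k]'hk'| := by
    rw [← hz]; simp
  have hb := hD.2 k hk' j hjk i hij
  rw [List.getD_eq_getElem arr 0 (by omega), List.getD_eq_getElem arr 0 (by omega),
      List.getD_eq_getElem arr 0 hk'] at hb
  rw [hxe, hye, hze]
  calc (99999999999999 : Int) < |arr[i] * arr[j] * arr[k]| := hb
  _ = |arr[i]| * (|arr[j]| * |arr[k]|) := by rw [abs_mul, abs_mul, mul_assoc]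

theorem pv_notD_min_le (arr : List Int) (hpre : 3 ≤ arr.length) (hnd : ¬ D_gamingArray arr)
    (m : Int) (hm : pvm3 (arr.map (fun z => |z|)) = some m) : m ≤ 99999999999999 := by
  unfold D_gamingArray at hnd
  push Not at hnd
  obtain ⟨k, hk, j, hjk, i, hij, hb⟩ := hnd hpre
  set b : List Int := arr.map (fun z => |z|) with hbdef
  have hbn : ∀ w ∈ b, 0 ≤ w := by
    intro w hw
    obtain ⟨v, _, rfl⟩ := List.mem_map.mp hw
    exact abs_nonneg v
  have hkb : k < b.length := by simp [hbdef]; omega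
  obtain ⟨m', hm', hle⟩ := pvm3_le b hbn (b[i]'(by omega)) (b[j]'(by omega)) (b[k]'hkb)
    (pv_idx3_sub b i j k hij hjk hkb)
  rw [hm] at hm'
  obtain rfl : m = m' := by injection hm'
  refine le_trans hle ?_
  have hbi : b[i]'(by omega) = |arr[i]'(by omega)| := by simp [hbdef]
  have hbj : b[j]'(by omega) = |arr[j]'(by omega)| := by simp [hbdef]
  have hbk : b[k]'hkb = |arr[k]'hk| := by simp [hbdef]
  rw [List.getD_eq_getElem arr 0 (by omega), List.getD_eq_getElem arr 0 (by omega),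
      List.getD_eq_getElem arr 0 hk] at hb
  rw [hbi, hbj, hbk]
  calc |arr[i]| * (|arr[j]| * |arr[k]|) = |arr[i] * arr[j] * arr[k]| := by
        rw [abs_mul, abs_mul, mul_assoc]
  _ ≤ 99999999999999 := hb

-- decimal rendering: the accumulator only grows, and n ≥ 10^e forces at least e+1 digits
theorem pv_tdc_acc_le : ∀ (f n : Nat) (l : List Char), l.length ≤ (Nat.toDigitsCore 10 f n l).length := by
  intro f
  induction f with
  | zero => intro n l; simp [Nat.toDigitsCore]
  | succ f ih =>
      intro n l
      simp only [Nat.toDigitsCore]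
      split
      · simp
      · exact le_trans (by simp) (ih (n / 10) (Nat.digitChar (n % 10) :: l))

theorem pv_tdc_lb : ∀ (e f n : Nat) (l : List Char), 10 ^ e ≤ n → e < f →
    e + 1 + l.length ≤ (Nat.toDigitsCore 10 f n l).length := by
  intro e
  induction e with
  | zero =>
      intro f n l hn hf
      cases f with
      | zero => omega
      | succ f' =>
          simp only [Nat.toDigitsCore]
          split
          · simp only [List.length_cons]; omega
          · have := pv_tdc_acc_le f' (n / 10) (Nat.digitChar (n % 10) :: l)
            simp at this ⊢
            omega
  | succ e ih =>
      intro f n l hn hf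
      cases f with
      | zero => omega
      | succ f' =>
          have hge : 10 ^ (e + 1) ≤ n := hn
          have hdiv : 10 ^ e ≤ n / 10 := by
            rw [Nat.le_div_iff_mul_le (by norm_num)]
            calc 10 ^ e * 10 = 10 ^ (e + 1) := by ring
            _ ≤ n := hge
          have hne : ¬ (n / 10 = 0) := by
            have : 1 ≤ 10 ^ e := Nat.one_le_pow _ _ (by norm_num)
            omega
          simp only [Nat.toDigitsCore]
          rw [if_neg hne]
          have := ih f' (n / 10) (Nat.digitChar (n % 10) :: l) hdiv (by omega)
          simp at this ⊢
          omega

theorem pv_toDigits_lb (n : Nat) (h : 10 ^ 14 ≤ n) : 15 ≤ (Nat.toDigits 10 n).length := by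
  have h14 : (14 : Nat) < n + 1 := by
    have : (14 : Nat) < 10 ^ 14 := by norm_num
    omega
  have := pv_tdc_lb 14 (n + 1) n [] h h14
  simpa [Nat.toDigits] using this

theorem pv_toChars_nonneg (n : Int) (h : 0 ≤ n) :
    PySem.Int.toChars n = Nat.toDigits 10 n.toNat := by
  simp [PySem.Int.toChars, not_lt.mpr h]

-- ===== VERDICT (by name: the statements are the Claim_ definitions above) =====
theorem gamingArray_spec : Claim_unchanged_gamingArray := by
  intro arr _ hpre
  unfold Pre_gamingArray at hpre
  intro hnd
  obtain ⟨m, M, hm3, hA, hB⟩ := pv_forms arr hpre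
  have hle : m ≤ 99999999999999 := pv_notD_min_le arr hpre hnd m hm3
  rw [hA, hB, min_eq_right hle]

theorem gamingArray_changed : Claim_changed_gamingArray := by
  unfold Claim_changed_gamingArray; decide

theorem gamingArray_tight : Claim_exact_gamingArray := by
  intro arr _ hpre hD heq
  unfold Pre_gamingArray at hpre
  obtain ⟨m, M, hm3, hA, hB⟩ := pv_forms arr hpre
  have hgt : 99999999999999 < m := pv_D_min_gt arr hD m hm3
  rw [hA, hB, min_eq_left (by omega)] at heq
  have hlist := congrArg String.toList heq
  simp only [String.toList_append, PySem.Int.toList_toStr] at hlist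
  have hlen := congrArg List.length hlist
  simp only [List.length_append] at hlen
  have hsent : (PySem.Int.toChars 99999999999999).length = 14 := by decide
  have hm0 : (0 : Int) ≤ m := by omega
  have hmn : (10 : Nat) ^ 14 ≤ m.toNat := by
    have : (100000000000000 : Int) ≤ m := by omega
    omega
  have hmlen : 15 ≤ (PySem.Int.toChars m).length := by
    rw [pv_toChars_nonneg m hm0]
    exact pv_toDigits_lb m.toNat (by exact_mod_cast hmn)
  omega
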